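-- pv_equiv track=rewrite | github.com/AndySheu/CalHacks2018 | summarize.py | parse
-- ===== SOURCE A (Python) =====
-- def parse(text):
--     text = text.split('.')
--     temp = []
--     for t in text:
--         temp += t.split('!')
--     text = []
--     for t in temp:
--         text += t.split('?')
--     return '. '.join(text)
-- ===== SOURCE B (Python) =====
-- def parse(text):
--     segments = []
--     cur = []
--     for ch in text:
--         if ch in '.!?':
--             segments.append(''.join(cur))
--             cur = []
--         else:
--             cur.append(ch)
--     segments.append(''.join(cur))
--     return '. '.join(segments)
-- ===== Notes on version B (the rewrite author's own statement) =====
-- stated objective: alternative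
-- what changed: Replaces the three cascaded split passes (with repeated list concatenation) by one linear character scan that flushes the current buffer at each sentence delimiter and joins the collected segments once.
import Mathlib
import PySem

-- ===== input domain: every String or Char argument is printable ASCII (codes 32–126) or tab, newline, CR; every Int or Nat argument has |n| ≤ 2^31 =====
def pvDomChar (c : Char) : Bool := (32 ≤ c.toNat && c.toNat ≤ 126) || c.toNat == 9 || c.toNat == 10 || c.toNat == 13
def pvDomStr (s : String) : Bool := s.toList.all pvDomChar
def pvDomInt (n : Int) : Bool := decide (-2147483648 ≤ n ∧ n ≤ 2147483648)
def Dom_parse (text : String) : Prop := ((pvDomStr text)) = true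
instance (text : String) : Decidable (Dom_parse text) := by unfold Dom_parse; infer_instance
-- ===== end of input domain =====

-- B replaces A's three cascaded split passes by a single character scan (alternative decomposition; return value proved equal).

-- ===== PORT A =====
-- A: split on '.', then re-split every piece on '!', then every piece of that on '?', join with '. '.
def parse (text : String) : String :=
  String.ofList (PySem.Chars.join ". ".toList
    (((PySem.Chars.splitOn text.toList ['.']).foldl
        (fun acc t => acc ++ PySem.Chars.splitOn t ['!']) []).foldl
      (fun acc t => acc ++ PySem.Chars.splitOn t ['?']) []))

-- ===== PORT B =====
-- B: one pass; flush the buffer at each delimiter, append the final buffer, join once.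
def parse_alt (text : String) : String :=
  String.ofList (PySem.Chars.join ". ".toList
    ((text.toList.foldl
        (fun (st : List (List Char) × List Char) c =>
          if c = '.' ∨ c = '!' ∨ c = '?' then (st.1 ++ [st.2], []) else (st.1, st.2 ++ [c]))
        ([], [])).1
      ++ [(text.toList.foldl
        (fun (st : List (List Char) × List Char) c =>
          if c = '.' ∨ c = '!' ∨ c = '?' then (st.1 ++ [st.2], []) else (st.1, st.2 ++ [c]))
        ([], [])).2]))

-- ===== PRECONDITION & SPEC =====
def Spec_parse (text : String) (out : String) : Prop := out = parse_alt text
instance (text : String) (out : String) : Decidable (Spec_parse text out) := by unfold Spec_parse; infer_instance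

-- ===== CLAIM (what is proved, stated in full; the proofs are below) =====
def Claim_equal_parse : Prop := ∀ (text : String), Dom_parse text → Spec_parse text (parse text)

-- ===== LEMMAS AND PROOFS =====

theorem modifyHead_id_fun (l : List (List Char)) : List.modifyHead (fun x => x) l = l := by
  cases l <;> simp

-- PySem's fueled split on a one-char separator is List.splitOnP on equality with that char.
theorem go_spec (c : Char) (l cur : List Char) (acc : List (List Char)) (fuel : Nat)
    (h : l.length ≤ fuel) :
    PySem.Chars.splitOn.go [c] fuel l cur acc
      = acc.reverse ++ List.modifyHead (cur.reverse ++ ·) (List.splitOnP (· == c) l) := by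
  induction fuel generalizing l cur acc with
  | zero =>
    have hl : l = [] := List.eq_nil_of_length_eq_zero (Nat.le_zero.mp h)
    subst hl
    rw [PySem.Chars.splitOn.go.eq_def]
    simp [List.splitOnP_nil]
  | succ fuel ih =>
    cases l with
    | nil =>
      rw [PySem.Chars.splitOn.go.eq_def]
      simp [List.splitOnP_nil]
    | cons x rest =>
      by_cases hx : x = c
      · subst hx
        have hpre : [x].isPrefixOf (x :: rest) = true := by simp [List.isPrefixOf]
        rw [PySem.Chars.splitOn.go.eq_def]
        simp only [hpre, if_pos, List.length_singleton, List.drop_one, List.tail_cons]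
        simp only [List.length_cons] at h
        rw [ih _ _ _ (by omega)]
        simp [List.splitOnP_cons, modifyHead_id_fun]
      · have hpre : [c].isPrefixOf (x :: rest) = false := by
          simp [List.isPrefixOf]; exact fun hc => (hx hc.symm).elim
        rw [PySem.Chars.splitOn.go.eq_def]
        simp only [hpre, Bool.false_eq_true, if_false]
        simp only [List.length_cons] at h
        rw [ih _ _ _ (by omega)]
        obtain ⟨hd, tl, hs⟩ := List.exists_cons_of_ne_nil (List.splitOnP_ne_nil (· == c) rest)
        simp [List.splitOnP_cons, hx, hs]

theorem splitOn_single (c : Char) (l : List Char) :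
    PySem.Chars.splitOn l [c] = List.splitOnP (· == c) l := by
  rw [PySem.Chars.splitOn, go_spec c l [] [] (l.length + 1) (by omega)]
  obtain ⟨hd, tl, hs⟩ := List.exists_cons_of_ne_nil (List.splitOnP_ne_nil (· == c) l)
  simp [hs]

-- Re-splitting every piece on q is splitting once on the disjunction.
theorem flatMap_splitOnP (p q : Char → Bool) (l : List Char) :
    (List.splitOnP p l).flatMap (List.splitOnP q)
      = List.splitOnP (fun x => p x || q x) l := by
  induction l with
  | nil => simp [List.splitOnP_nil]
  | cons x xs ih =>
    by_cases hp : p x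
    · simp [List.splitOnP_cons, hp, List.flatMap_cons, List.splitOnP_nil, ih]
    · obtain ⟨hd, tl, hs⟩ := List.exists_cons_of_ne_nil (List.splitOnP_ne_nil p xs)
      rw [hs] at ih
      by_cases hq : q x
      · simp [List.splitOnP_cons, hp, hq, hs, List.flatMap_cons, ← ih]
      · obtain ⟨hd', tl', hs'⟩ := List.exists_cons_of_ne_nil (List.splitOnP_ne_nil q hd)
        simp [List.splitOnP_cons, hp, hq, hs, List.flatMap_cons, ← ih, hs']

-- B's scan computes the same split.
theorem scan_spec (l : List Char) (segs : List (List Char)) (buf : List Char) :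
    (l.foldl
      (fun (st : List (List Char) × List Char) c =>
        if c = '.' ∨ c = '!' ∨ c = '?' then (st.1 ++ [st.2], []) else (st.1, st.2 ++ [c]))
      (segs, buf)).1
    ++ [(l.foldl
      (fun (st : List (List Char) × List Char) c =>
        if c = '.' ∨ c = '!' ∨ c = '?' then (st.1 ++ [st.2], []) else (st.1, st.2 ++ [c]))
      (segs, buf)).2]
      = segs ++ List.modifyHead (buf ++ ·)
          (List.splitOnP (fun x => ((x == '.') || (x == '!')) || (x == '?')) l) := by
  induction l generalizing segs buf with
  | nil => simp [List.splitOnP_nil]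
  | cons x xs ih =>
    by_cases hx : x = '.' ∨ x = '!' ∨ x = '?'
    · have hb : (((x == '.') || (x == '!')) || (x == '?')) = true := by
        rcases hx with h | h | h <;> simp [h]
      simp only [List.foldl_cons, if_pos hx]
      rw [ih]
      simp [List.splitOnP_cons, hb, modifyHead_id_fun]
    · have hb : (((x == '.') || (x == '!')) || (x == '?')) = false := by
        simp only [Bool.or_eq_false_iff, beq_eq_false_iff_ne]
        exact ⟨⟨fun h => hx (Or.inl h), fun h => hx (Or.inr (Or.inl h))⟩,
               fun h => hx (Or.inr (Or.inr h))⟩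
      simp only [List.foldl_cons, if_neg hx]
      rw [ih]
      obtain ⟨hd, tl, hs⟩ := List.exists_cons_of_ne_nil
        (List.splitOnP_ne_nil (fun x => ((x == '.') || (x == '!')) || (x == '?')) xs)
      simp [List.splitOnP_cons, hb, hs]

theorem foldl_append_split (sep : Char) (xs : List (List Char)) (acc : List (List Char)) :
    xs.foldl (fun acc t => acc ++ PySem.Chars.splitOn t [sep]) acc
      = acc ++ xs.flatMap (List.splitOnP (· == sep)) := by
  induction xs generalizing acc with
  | nil => simp
  | cons h t ih =>
    rw [List.foldl_cons, ih]
    simp [splitOn_single, List.flatMap_cons]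

-- ===== VERDICT (by name: the statement is the Claim_ definition above) =====
theorem parse_spec : Claim_equal_parse := by
  intro text _
  show parse text = parse_alt text
  unfold parse parse_alt
  rw [scan_spec text.toList [] []]
  rw [splitOn_single, foldl_append_split, foldl_append_split]
  simp only [List.nil_append]
  rw [flatMap_splitOnP, flatMap_splitOnP]
  obtain ⟨hd, tl, hs⟩ := List.exists_cons_of_ne_nil
    (List.splitOnP_ne_nil (fun x => (((x == '.') || (x == '!')) || (x == '?'))) text.toList)
  simp [hs]
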